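-- pv_equiv track=rewrite | github.com/mengzhibin/mengzhibin.github.io | curvelane/plot.py | sort_lanes
-- ===== SOURCE A (Python) =====
-- def sort_lanes(coordinates,img_w):
--     bottom_points = [c[1][-1] for c in coordinates]
--     left_lanes = []
--     middle_lanes = []
--     right_lanes = []
--     for idx in range(len(bottom_points)):
--         if int(bottom_points[idx]) == 0:
--             left_lanes.append(coordinates[idx])
--         elif int(bottom_points[idx]) == img_w-1:
--             right_lanes.append(coordinates[idx])
--         else:
--             middle_lanes.append(coordinates[idx])
--
--     left_lanes = sorted(left_lanes,key=lambda x:(x[0][-1]),reverse=False)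
--     right_lanes = sorted(right_lanes,key=lambda x: (x[0][-1]),reverse=True)
--     middle_lanes = sorted(middle_lanes,key=lambda x: (x[1][-1]),reverse=False)
--     return left_lanes+middle_lanes+right_lanes
-- ===== SOURCE B (Python) =====
-- def sort_lanes(coordinates, img_w):
--     def key(c):
--         bottom = int(c[1][-1])
--         if bottom == 0:
--             return (0, c[0][-1])
--         if bottom == img_w - 1:
--             return (2, -c[0][-1])
--         return (1, c[1][-1])
--     return sorted(coordinates, key=key)
-- ===== Notes on version B (the rewrite author's own statement) =====
-- stated objective: simpler
-- what changed: A's three-bucket index loop followed by three separate sorted() calls (one with reverse=True) is replaced by a single stable sorted() over all lanes under a composite key (category, within-category coordinate), with the right-lane key negated to emulate reverse=True.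
import Mathlib
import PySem

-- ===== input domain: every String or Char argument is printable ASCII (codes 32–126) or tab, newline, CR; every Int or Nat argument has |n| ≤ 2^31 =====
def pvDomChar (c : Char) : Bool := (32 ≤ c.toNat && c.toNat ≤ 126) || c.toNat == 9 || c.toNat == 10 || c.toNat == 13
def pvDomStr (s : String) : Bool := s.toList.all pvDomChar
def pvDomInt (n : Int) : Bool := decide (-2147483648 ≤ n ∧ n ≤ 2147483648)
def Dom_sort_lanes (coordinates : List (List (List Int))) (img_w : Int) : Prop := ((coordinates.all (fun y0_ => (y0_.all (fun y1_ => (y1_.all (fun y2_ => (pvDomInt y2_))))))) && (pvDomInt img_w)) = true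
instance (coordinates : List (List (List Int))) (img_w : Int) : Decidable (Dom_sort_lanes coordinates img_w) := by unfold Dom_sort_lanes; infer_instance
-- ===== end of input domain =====

-- B replaces A's three-bucket partition followed by three separate stable sorts with ONE
-- stable sort under a composite (category, within-category) key; equal wherever A returns.

-- ===== PORT A =====
-- shared key helpers: c[1][-1] and c[0][-1] (defaulted where Python raises; Pre_ excludes those inputs)
def keyBottom (c : List (List Int)) : Int :=
  (PySem.List.pyGet? ((PySem.List.pyGet? c 1).getD []) (-1)).getD 0
def keyTop (c : List (List Int)) : Int :=
  (PySem.List.pyGet? ((PySem.List.pyGet? c 0).getD []) (-1)).getD 0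

def sort_lanes (coordinates : List (List (List Int))) (img_w : Int) : List (List (List Int)) :=
  let bottom_points := coordinates.map (fun c => keyBottom c)
  let p := (PySem.List.pyRange 0 (PySem.List.len bottom_points)).foldl
    (fun (acc : List (List (List Int)) × List (List (List Int)) × List (List (List Int))) idx =>
      if PySem.List.pyGetD bottom_points idx 0 = 0 then
        (acc.1 ++ [PySem.List.pyGetD coordinates idx []], acc.2.1, acc.2.2)
      else if PySem.List.pyGetD bottom_points idx 0 = img_w - 1 then
        (acc.1, acc.2.1, acc.2.2 ++ [PySem.List.pyGetD coordinates idx []])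
      else
        (acc.1, acc.2.1 ++ [PySem.List.pyGetD coordinates idx []], acc.2.2))
    ([], [], [])
  let left_lanes := PySem.List.sorted p.1 (fun x => keyTop x) false
  let right_lanes := PySem.List.sorted p.2.2 (fun x => keyTop x) true
  let middle_lanes := PySem.List.sorted p.2.1 (fun x => keyBottom x) false
  left_lanes ++ middle_lanes ++ right_lanes

-- ===== PORT B =====
-- Source B's key function `key(c)`, as the two components of the returned tuple
def altKey1 (img_w : Int) (c : List (List Int)) : Int :=
  if keyBottom c = 0 then 0 else if keyBottom c = img_w - 1 then 2 else 1
def altKey2 (img_w : Int) (c : List (List Int)) : Int :=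
  if keyBottom c = 0 then keyTop c else if keyBottom c = img_w - 1 then -(keyTop c) else keyBottom c

def sort_lanes_alt (coordinates : List (List (List Int))) (img_w : Int) : List (List (List Int)) :=
  PySem.List.sorted2 coordinates (altKey1 img_w) (altKey2 img_w) false

-- ===== PRECONDITION & SPEC =====
-- Pre_ excludes exactly the inputs where Python A raises IndexError: a lane with fewer than
-- two point lists, an empty bottom list c[1], or a left/right lane with an empty top list c[0].
def Pre_sort_lanes (coordinates : List (List (List Int))) (img_w : Int) : Prop :=
  ∀ c ∈ coordinates, 2 ≤ c.length ∧ c.getD 1 [] ≠ [] ∧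
    (((c.getD 1 []).getLastD 0 = 0 ∨ (c.getD 1 []).getLastD 0 = img_w - 1) → c.getD 0 [] ≠ [])
instance (coordinates : List (List (List Int))) (img_w : Int) : Decidable (Pre_sort_lanes coordinates img_w) := by
  unfold Pre_sort_lanes; infer_instance

def pvWitness_sort_lanes : List (List (List Int)) × Int := ([[[5], [0]], [[1], [2]]], 4)

def Spec_sort_lanes (coordinates : List (List (List Int))) (img_w : Int) (out : List (List (List Int))) : Prop := out = sort_lanes_alt coordinates img_w
instance (coordinates : List (List (List Int))) (img_w : Int) (out : List (List (List Int))) : Decidable (Spec_sort_lanes coordinates img_w out) := by unfold Spec_sort_lanes; infer_instance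

-- ===== CLAIM (what is proved, stated in full; the proofs are below) =====
def Claim_equal_sort_lanes : Prop := ∀ (coordinates : List (List (List Int))) (img_w : Int), Dom_sort_lanes coordinates img_w → Pre_sort_lanes coordinates img_w → Spec_sort_lanes coordinates img_w (sort_lanes coordinates img_w)

-- ===== LEMMAS AND PROOFS =====

-- the boolean comparator sorted2 uses for B's composite key (lexicographic on the tuple)
def lexLt (w : Int) (a b : List (List Int)) : Bool :=
  decide (altKey1 w a < altKey1 w b) || (!decide (altKey1 w b < altKey1 w a) && decide (altKey2 w a < altKey2 w b))

theorem sorted2_eq_foldl (xs : List (List (List Int))) (w : Int) :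
    PySem.List.sorted2 xs (altKey1 w) (altKey2 w) false
    = xs.foldl (fun acc x => PySem.List.insertBy (lexLt w) x acc) [] := rfl

theorem insertBy_append_of_not_before {α : Type} (before : α → α → Bool) (x : α) (A B : List α)
    (hA : ∀ a ∈ A, before x a = false) :
    PySem.List.insertBy before x (A ++ B) = A ++ PySem.List.insertBy before x B := by
  induction A with
  | nil => rfl
  | cons a A ih =>
      have h := hA a (by simp)
      simp [PySem.List.insertBy, h, ih (fun a ha => hA a (by simp [ha]))]

theorem insertBy_append_of_before {α : Type} (before : α → α → Bool) (x : α) (A B : List α)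
    (hB : ∀ b ∈ B, before x b = true) :
    PySem.List.insertBy before x (A ++ B) = PySem.List.insertBy before x A ++ B := by
  induction A with
  | nil =>
      cases B with
      | nil => rfl
      | cons b B => simp [PySem.List.insertBy, hB b (by simp)]
  | cons a A ih =>
      by_cases h : before x a = true
      · simp [PySem.List.insertBy, h]
      · simp only [Bool.not_eq_true] at h
        simp [PySem.List.insertBy, h, ih]

theorem insertBy_congr {α : Type} (before before' : α → α → Bool) (x : α) (A : List α)
    (h : ∀ a ∈ A, before x a = before' x a) :
    PySem.List.insertBy before x A = PySem.List.insertBy before' x A := by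
  induction A with
  | nil => rfl
  | cons a A ih =>
      have ha := h a (by simp)
      by_cases hb : before x a = true
      · simp [PySem.List.insertBy, hb, ha ▸ hb]
      · simp only [Bool.not_eq_true] at hb
        simp [PySem.List.insertBy, hb, ha ▸ hb, ih (fun a hm => h a (by simp [hm]))]

theorem k1_range (w : Int) (c : List (List Int)) :
    altKey1 w c = 0 ∨ altKey1 w c = 1 ∨ altKey1 w c = 2 := by
  unfold altKey1; split_ifs <;> simp

theorem k2_of_k1_zero (w : Int) (c : List (List Int)) (h : altKey1 w c = 0) :
    altKey2 w c = keyTop c := by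
  unfold altKey1 at h; unfold altKey2; split_ifs at h ⊢ <;> omega
theorem k2_of_k1_one (w : Int) (c : List (List Int)) (h : altKey1 w c = 1) :
    altKey2 w c = keyBottom c := by
  unfold altKey1 at h; unfold altKey2; split_ifs at h ⊢ <;> omega
theorem k2_of_k1_two (w : Int) (c : List (List Int)) (h : altKey1 w c = 2) :
    altKey2 w c = -(keyTop c) := by
  unfold altKey1 at h; unfold altKey2; split_ifs at h ⊢ <;> simp_all

-- the body of A's partition loop, expressed on the lane itself rather than its index
def stepC (w : Int)
    (acc : List (List (List Int)) × List (List (List Int)) × List (List (List Int)))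
    (c : List (List Int)) :
    List (List (List Int)) × List (List (List Int)) × List (List (List Int)) :=
  if keyBottom c = 0 then (acc.1 ++ [c], acc.2.1, acc.2.2)
  else if keyBottom c = w - 1 then (acc.1, acc.2.1, acc.2.2 ++ [c])
  else (acc.1, acc.2.1 ++ [c], acc.2.2)

theorem partition_eq (w : Int) (xs : List (List (List Int)))
    (L M R : List (List (List Int))) :
    xs.foldl (stepC w) (L, M, R)
    = (L ++ xs.filter (fun c => altKey1 w c == 0),
       M ++ xs.filter (fun c => altKey1 w c == 1),
       R ++ xs.filter (fun c => altKey1 w c == 2)) := by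
  induction xs generalizing L M R with
  | nil => simp
  | cons x xs ih =>
      simp only [List.foldl_cons, List.filter_cons, stepC]
      by_cases h0 : keyBottom x = 0
      · have hx : altKey1 w x = 0 := by unfold altKey1; rw [if_pos h0]
        rw [if_pos h0]
        simp [hx, ih]
      · by_cases h2 : keyBottom x = w - 1
        · have hx : altKey1 w x = 2 := by unfold altKey1; rw [if_neg h0, if_pos h2]
          rw [if_neg h0, if_pos h2]
          simp [hx, ih]
        · have hx : altKey1 w x = 1 := by unfold altKey1; rw [if_neg h0, if_neg h2]
          rw [if_neg h0, if_neg h2]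
          simp [hx, ih]

theorem fold_split (w : Int) (xs : List (List (List Int)))
    (L M R : List (List (List Int)))
    (hL : ∀ a ∈ L, altKey1 w a = 0) (hM : ∀ a ∈ M, altKey1 w a = 1)
    (hR : ∀ a ∈ R, altKey1 w a = 2) :
    xs.foldl (fun acc x => PySem.List.insertBy (lexLt w) x acc) (L ++ M ++ R)
    = (xs.filter (fun c => altKey1 w c == 0)).foldl
        (fun acc x => PySem.List.insertBy (fun a b => decide (keyTop a < keyTop b)) x acc) L
      ++ (xs.filter (fun c => altKey1 w c == 1)).foldl
        (fun acc x => PySem.List.insertBy (fun a b => decide (keyBottom a < keyBottom b)) x acc) M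
      ++ (xs.filter (fun c => altKey1 w c == 2)).foldl
        (fun acc x => PySem.List.insertBy (fun a b => decide (keyTop b < keyTop a)) x acc) R := by
  induction xs generalizing L M R with
  | nil => simp
  | cons x xs ih =>
      simp only [List.foldl_cons, List.filter_cons]
      rcases k1_range w x with hx | hx | hx
      · -- x is a left lane
        have hstep : PySem.List.insertBy (lexLt w) x (L ++ M ++ R)
            = PySem.List.insertBy (fun a b => decide (keyTop a < keyTop b)) x L ++ M ++ R := by
          rw [List.append_assoc,
            insertBy_append_of_before (lexLt w) x L (M ++ R) (by
              intro b hb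
              rcases List.mem_append.mp hb with h | h
              · have := hM b h; simp [lexLt, hx, this]
              · have := hR b h; simp [lexLt, hx, this]),
            insertBy_congr (lexLt w) (fun a b => decide (keyTop a < keyTop b)) x L (by
              intro a ha
              have h1 := hL a ha
              simp [lexLt, hx, h1, k2_of_k1_zero w x hx, k2_of_k1_zero w a h1]),
            ← List.append_assoc]
        rw [hstep, ih (PySem.List.insertBy _ x L) M R (by
            intro a ha
            rcases (PySem.List.mem_insertBy _ x a L).mp ha with rfl | h
            · exact hx
            · exact hL a h) hM hR]
        simp [hx]
      · -- x is a middle lane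
        have hstep : PySem.List.insertBy (lexLt w) x (L ++ M ++ R)
            = L ++ PySem.List.insertBy (fun a b => decide (keyBottom a < keyBottom b)) x M ++ R := by
          rw [List.append_assoc,
            insertBy_append_of_not_before (lexLt w) x L (M ++ R) (by
              intro a ha
              have := hL a ha; simp [lexLt, hx, this]),
            insertBy_append_of_before (lexLt w) x M R (by
              intro b hb
              have := hR b hb; simp [lexLt, hx, this]),
            insertBy_congr (lexLt w) (fun a b => decide (keyBottom a < keyBottom b)) x M (by
              intro a ha
              have h1 := hM a ha
              simp [lexLt, hx, h1, k2_of_k1_one w x hx, k2_of_k1_one w a h1]),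
            ← List.append_assoc]
        rw [hstep, ih L (PySem.List.insertBy _ x M) R hL (by
            intro a ha
            rcases (PySem.List.mem_insertBy _ x a M).mp ha with rfl | h
            · exact hx
            · exact hM a h) hR]
        simp [hx]
      · -- x is a right lane
        have hstep : PySem.List.insertBy (lexLt w) x (L ++ M ++ R)
            = L ++ M ++ PySem.List.insertBy (fun a b => decide (keyTop b < keyTop a)) x R := by
          rw [insertBy_append_of_not_before (lexLt w) x (L ++ M) R (by
              intro a ha
              rcases List.mem_append.mp ha with h | h
              · have := hL a h; simp [lexLt, hx, this]
              · have := hM a h; simp [lexLt, hx, this]),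
            insertBy_congr (lexLt w) (fun a b => decide (keyTop b < keyTop a)) x R (by
              intro a ha
              have h1 := hR a ha
              have e1 := k2_of_k1_two w x hx
              have e2 := k2_of_k1_two w a h1
              simp [lexLt, hx, h1, e1, e2])]
        rw [hstep, ih L M (PySem.List.insertBy _ x R) hL hM (by
            intro a ha
            rcases (PySem.List.mem_insertBy _ x a R).mp ha with rfl | h
            · exact hx
            · exact hR a h)]
        simp [hx]

theorem range_fold_eq (coordinates : List (List (List Int))) (img_w : Int) :
    (PySem.List.pyRange 0 (PySem.List.len (coordinates.map (fun c => keyBottom c)))).foldl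
      (fun (acc : List (List (List Int)) × List (List (List Int)) × List (List (List Int))) idx =>
        if PySem.List.pyGetD (coordinates.map (fun c => keyBottom c)) idx 0 = 0 then
          (acc.1 ++ [PySem.List.pyGetD coordinates idx []], acc.2.1, acc.2.2)
        else if PySem.List.pyGetD (coordinates.map (fun c => keyBottom c)) idx 0 = img_w - 1 then
          (acc.1, acc.2.1, acc.2.2 ++ [PySem.List.pyGetD coordinates idx []])
        else
          (acc.1, acc.2.1 ++ [PySem.List.pyGetD coordinates idx []], acc.2.2))
      ([], [], [])
    = coordinates.foldl (stepC img_w) ([], [], []) := by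
  have hb : ∀ idx : Int,
      PySem.List.pyGetD (coordinates.map (fun c => keyBottom c)) idx 0
      = keyBottom (PySem.List.pyGetD coordinates idx []) :=
    fun idx => PySem.List.pyGetD_map (fun c => keyBottom c) coordinates idx []
  have hlen : PySem.List.len (coordinates.map (fun c => keyBottom c)) = PySem.List.len coordinates := by
    simp [PySem.List.len]
  have hfun : (fun (acc : List (List (List Int)) × List (List (List Int)) × List (List (List Int))) idx =>
        if PySem.List.pyGetD (coordinates.map (fun c => keyBottom c)) idx 0 = 0 then
          (acc.1 ++ [PySem.List.pyGetD coordinates idx []], acc.2.1, acc.2.2)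
        else if PySem.List.pyGetD (coordinates.map (fun c => keyBottom c)) idx 0 = img_w - 1 then
          (acc.1, acc.2.1, acc.2.2 ++ [PySem.List.pyGetD coordinates idx []])
        else
          (acc.1, acc.2.1 ++ [PySem.List.pyGetD coordinates idx []], acc.2.2))
      = (fun acc idx => stepC img_w acc (PySem.List.pyGetD coordinates idx [])) := by
    funext acc idx
    rw [hb idx]
    rfl
  rw [hfun, hlen, PySem.List.foldl_pyRange_zero_pyGetD coordinates [] (stepC img_w) ([], [], [])]

-- ===== VERDICT (by name: the statement is the Claim_ definition above) =====
theorem sort_lanes_spec : Claim_equal_sort_lanes := by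
  intro coordinates img_w _ _
  unfold Spec_sort_lanes sort_lanes sort_lanes_alt
  simp only []
  rw [range_fold_eq coordinates img_w, partition_eq img_w coordinates [] [] []]
  have key := fold_split img_w coordinates [] [] [] (by simp) (by simp) (by simp)
  simp only [List.nil_append] at key
  simp only [PySem.List.sorted_eq_foldl_insertBy, PySem.List.sorted_rev_eq_foldl_insertBy,
    sorted2_eq_foldl, List.nil_append]
  rw [key]
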